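-- pv_equiv track=rewrite | github.com/VoiceofSiren/StudyingProgramming | Python/Coding Test/Programmers/lv0/pcce-013.py | solution
-- ===== SOURCE A (Python) =====
-- def solution(my_string, is_suffix):
--     result = 1
--     range_num = min(len(my_string), len(is_suffix))
--     for i in range(-1, range_num * (-1) - 1, -1):
--         if is_suffix[i] != my_string[i]:
--             result = 0
--     if len(is_suffix) > len(my_string):
--         result = 0
--     return result
-- ===== SOURCE B (Python) =====
-- def solution(my_string, is_suffix):
--     n = len(is_suffix)
--     m = len(my_string)
--     return 1 if n <= m and my_string[m - n:] == is_suffix else 0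
-- ===== Notes on version B (the rewrite author's own statement) =====
-- stated objective: simpler
-- what changed: Replaces the backward per-character loop with negative indexing plus a post-hoc length override by a single tail-slice equality comparison guarded by the length condition.
import Mathlib
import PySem

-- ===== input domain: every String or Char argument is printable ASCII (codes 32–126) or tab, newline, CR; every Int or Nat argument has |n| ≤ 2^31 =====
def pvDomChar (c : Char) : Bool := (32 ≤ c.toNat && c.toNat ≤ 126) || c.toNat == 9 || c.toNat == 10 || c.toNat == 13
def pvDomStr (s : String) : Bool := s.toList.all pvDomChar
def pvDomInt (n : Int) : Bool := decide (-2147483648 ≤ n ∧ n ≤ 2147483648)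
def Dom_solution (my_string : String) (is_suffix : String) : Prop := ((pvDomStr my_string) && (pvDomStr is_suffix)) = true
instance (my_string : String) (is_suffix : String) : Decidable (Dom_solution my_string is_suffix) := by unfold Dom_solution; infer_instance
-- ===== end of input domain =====

-- B replaces A's backward per-character loop (with its trailing length override) by a
-- single guarded tail-slice equality comparison; objective: simpler.

-- ===== PORT A =====
-- Literal port of A. The loop indices are always in range (|i| ≤ min of the lengths),
-- so comparing the pyGet? options is exact: neither side is ever none.
def solution (my_string : String) (is_suffix : String) : Int :=
  let s := my_string.toList
  let t := is_suffix.toList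
  let result : Int := 1
  let rangeNum : Int := min s.length t.length
  let result :=
    (PySem.List.pyRange (-1) (rangeNum * (-1) - 1) (-1)).foldl
      (fun res i =>
        if PySem.List.pyGet? t i ≠ PySem.List.pyGet? s i then 0 else res) result
  if (t.length : Int) > s.length then 0 else result

-- ===== PORT B =====
def solution_alt (my_string : String) (is_suffix : String) : Int :=
  let n := is_suffix.toList.length
  let m := my_string.toList.length
  if n ≤ m ∧ PySem.List.slice my_string.toList (some ((m - n : Nat) : Int)) none = is_suffix.toList
  then 1 else 0

-- ===== PRECONDITION & SPEC =====
def Spec_solution (my_string : String) (is_suffix : String) (out : Int) : Prop := out = solution_alt my_string is_suffix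
instance (my_string : String) (is_suffix : String) (out : Int) : Decidable (Spec_solution my_string is_suffix out) := by unfold Spec_solution; infer_instance

-- ===== CLAIM (what is proved, stated in full; the proofs are below) =====
def Claim_equal_solution : Prop := ∀ (my_string : String) (is_suffix : String), Dom_solution my_string is_suffix → Spec_solution my_string is_suffix (solution my_string is_suffix)

-- ===== LEMMAS AND PROOFS =====

-- once the accumulator is 0 it stays 0; otherwise it survives iff no mismatch occurs
theorem pv_foldl_absorb {α : Type} (P : α → Prop) [DecidablePred P] (l : List α) (a : Int) :
    l.foldl (fun res i => if P i then 0 else res) a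
      = if ∀ i ∈ l, ¬ P i then a else 0 := by
  induction l generalizing a with
  | nil => simp
  | cons x xs ih =>
    by_cases hx : P x <;> simp [List.foldl_cons, ih, hx, List.mem_cons]

-- tail-characters-equal ↔ drop equality, for t no longer than s
theorem pv_tail_eq (s t : List Char) (h : t.length ≤ s.length) :
    (∀ k < t.length, t[t.length - 1 - k]? = s[s.length - 1 - k]?) ↔
      s.drop (s.length - t.length) = t := by
  constructor
  · intro hk
    apply List.ext_getElem
    · simp; omega
    · intro j hj1 hj2
      have hj : j < t.length := hj2
      have := hk (t.length - 1 - j) (by omega)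
      rw [show t.length - 1 - (t.length - 1 - j) = j by omega,
          show s.length - 1 - (t.length - 1 - j) = s.length - t.length + j by omega] at this
      have hsj : s.length - t.length + j < s.length := by omega
      simp only [List.getElem?_eq_getElem hj, List.getElem?_eq_getElem hsj] at this
      simpa [List.getElem_drop] using this.symm
  · intro hd k hk
    have h1 : t.length - 1 - k < t.length := by omega
    have h2 : s.length - 1 - k < s.length := by omega
    have h3 : s.length - t.length + (t.length - 1 - k) < s.length := by omega
    rw [List.getElem?_eq_getElem h1, List.getElem?_eq_getElem h2]
    have := congrArg (fun l => l[t.length - 1 - k]?) hd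
    simp only [List.getElem?_drop, List.getElem?_eq_getElem h1,
      List.getElem?_eq_getElem h3] at this
    have h4 : s[s.length - 1 - k]'h2 = s[s.length - t.length + (t.length - 1 - k)]'h3 := by
      congr 1
      omega
    rw [h4]
    exact congrArg some (Option.some_inj.mp this).symm

-- ===== VERDICT =====
theorem solution_spec : Claim_equal_solution := by
  intro my_string is_suffix _
  unfold Spec_solution solution solution_alt
  set s := my_string.toList with hs
  set t := is_suffix.toList with ht
  simp only []
  by_cases hlen : t.length ≤ s.length
  · have hmin : (min (s.length : Int) (t.length : Int)) = (t.length : Int) := by omega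
    rw [hmin]
    have hrange : PySem.List.pyRange (-1) ((t.length : Int) * (-1) - 1) (-1)
        = (List.range t.length).map (fun (k : Nat) => -1 - (k : Int)) := by
      have h2 : (-1 - ((t.length : Int) * (-1) - 1)).toNat = t.length := by omega
      rw [PySem.List.pyRange_neg_one, h2]
    rw [hrange, List.foldl_map,
        pv_foldl_absorb (fun k : Nat => PySem.List.pyGet? t (-1 - (k:Int)) ≠ PySem.List.pyGet? s (-1 - (k:Int)))]
    have hget : ∀ k < t.length,
        (PySem.List.pyGet? t (-1 - (k:Int)) = PySem.List.pyGet? s (-1 - (k:Int))) ↔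
          (t[t.length - 1 - k]? = s[s.length - 1 - k]?) := by
      intro k hk
      have e1 : (-1 - (k:Int)) = -((k+1 : Nat) : Int) := by push_cast; ring
      rw [e1, PySem.List.pyGet?_neg_natCast t (k+1) (by omega) (by omega),
          PySem.List.pyGet?_neg_natCast s (k+1) (by omega) (by omega),
          show t.length - (k+1) = t.length - 1 - k by omega,
          show s.length - (k+1) = s.length - 1 - k by omega]
    have hcond : (∀ k ∈ List.range t.length,
        ¬ (PySem.List.pyGet? t (-1 - (k:Int)) ≠ PySem.List.pyGet? s (-1 - (k:Int)))) ↔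
          s.drop (s.length - t.length) = t := by
      rw [← pv_tail_eq s t hlen]
      constructor
      · intro h k hk
        exact (hget k hk).mp (not_not.mp (h k (List.mem_range.mpr hk)))
      · intro h k hk
        exact not_not.mpr ((hget k (List.mem_range.mp hk)).mpr (h k (List.mem_range.mp hk)))
    rw [PySem.List.slice_from_natCast]
    have hgt : ¬ ((t.length : Int) > (s.length : Int)) := by omega
    simp only [if_neg hgt]
    by_cases hd : s.drop (s.length - t.length) = t
    · rw [if_pos (hcond.mpr hd), if_pos ⟨hlen, hd⟩]
    · rw [if_neg (fun hh => hd (hcond.mp hh)), if_neg (fun hh => hd hh.2)]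
  · have hgt : ((t.length : Int) > (s.length : Int)) := by omega
    rw [if_pos hgt, if_neg (fun hh => hlen hh.1)]
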